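-- pv_equiv track=rewrite | github.com/vikkihuangkexin/VelocityBenchmarking | Evaluation/Angle-consistency/angle_consistency.py | resolve_differentiation_paths
-- ===== SOURCE A (Python) =====
-- from typing import Any, Dict, List, Literal, Optional, Tuple, TypedDict, Union
--
-- CELLTYPE_VARIANTS: Dict[str, List[str]] = {
--     "nlPC/ExN": ["nIPC/ExN"],
--     "nIPC/ExN": ["nlPC/ExN"],
-- }
--
-- def resolve_celltype_variant(
--     cell_type: str,
--     available_types: List[str]
-- ) -> Optional[str]:
--     """
--     Resolve cell type name to available variant.
--
--     Handles cases like 'nlPC/ExN' vs 'nIPC/ExN' where different datasets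
--     may use different naming conventions.
--     """
--     if cell_type in available_types:
--         return cell_type
--
--     # Check variants
--     if cell_type in CELLTYPE_VARIANTS:
--         for variant in CELLTYPE_VARIANTS[cell_type]:
--             if variant in available_types:
--                 return variant
--
--     return None
--
-- def resolve_differentiation_paths(
--     paths: Union[List[str], List[List[str]]],
--     available_types: List[str]
-- ) -> Union[List[str], List[List[str]]]:
--     """
--     Resolve differentiation paths by matching cell type variants.
--
--     Automatically handles naming variants (e.g., nlPC/ExN vs nIPC/ExN).
--     """
--     def resolve_single_path(path: List[str]) -> List[str]:
--         resolved = []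
--         for ct in path:
--             resolved_ct = resolve_celltype_variant(ct, available_types)
--             if resolved_ct:
--                 resolved.append(resolved_ct)
--             else:
--                 resolved.append(ct)  # Keep original if no match found
--         return resolved
--
--     if not paths:
--         return paths
--
--     # Check if multi-path (list of lists)
--     if isinstance(paths[0], list):
--         return [resolve_single_path(p) for p in paths]
--     else:
--         return resolve_single_path(paths)
-- ===== SOURCE B (Python) =====
-- from typing import Dict, List
--
-- CELLTYPE_VARIANTS: Dict[str, List[str]] = {
--     "nlPC/ExN": ["nIPC/ExN"],
--     "nIPC/ExN": ["nlPC/ExN"],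
-- }
--
-- def resolve_differentiation_paths(paths, available_types):
--     """Table-driven rewrite: the only elements that can change are the keys of
--     the constant CELLTYPE_VARIANTS table, so build a substitution dict from
--     that table (a key maps to its first available variant when the key itself
--     is unavailable), then map every path element through it.  No membership
--     test against available_types is performed per element."""
--     if not paths:
--         return paths
--     subs = {}
--     for name, variants in CELLTYPE_VARIANTS.items():
--         if name not in available_types:
--             for v in variants:
--                 if v in available_types:
--                     subs[name] = v
--                     break
--     if isinstance(paths[0], list):
--         return [[subs.get(ct, ct) for ct in p] for p in paths]
--     return [subs.get(ct, ct) for ct in paths]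
-- ===== Notes on version B (the rewrite author's own statement) =====
-- stated objective: faster
-- what changed: Instead of resolving each path element by scanning available_types (A), B is driven by the constant CELLTYPE_VARIANTS table: it builds, once, a substitution dict mapping each unavailable variant key to its first available variant, then maps the paths through that dict, so no per-element membership test against available_types happens at all.
import Mathlib
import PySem

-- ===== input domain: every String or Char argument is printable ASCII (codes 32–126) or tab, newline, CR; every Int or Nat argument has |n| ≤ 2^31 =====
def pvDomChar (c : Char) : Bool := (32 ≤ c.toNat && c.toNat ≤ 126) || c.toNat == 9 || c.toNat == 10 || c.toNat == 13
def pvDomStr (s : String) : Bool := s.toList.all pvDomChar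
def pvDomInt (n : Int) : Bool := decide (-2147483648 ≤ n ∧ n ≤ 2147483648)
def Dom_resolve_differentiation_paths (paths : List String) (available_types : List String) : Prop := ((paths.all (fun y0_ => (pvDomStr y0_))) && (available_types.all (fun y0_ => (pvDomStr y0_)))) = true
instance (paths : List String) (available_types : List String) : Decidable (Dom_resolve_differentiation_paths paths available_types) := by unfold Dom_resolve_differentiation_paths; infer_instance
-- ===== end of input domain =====

-- B is table-driven: it builds a substitution dict from the constant CELLTYPE_VARIANTS once, then maps the paths through it; same return value.
-- For the List String signature, the `isinstance(paths[0], list)` branch of both Pythons is statically false: only the flat branch is ported.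

-- ===== PORT A =====
-- module constant CELLTYPE_VARIANTS (shared by both Pythons)
def CELLTYPE_VARIANTS : PySem.Dict String (List String) :=
  PySem.Dict.ofList [("nlPC/ExN", ["nIPC/ExN"]), ("nIPC/ExN", ["nlPC/ExN"])]

-- the `for variant in CELLTYPE_VARIANTS[cell_type]` loop of resolve_celltype_variant
def pvVariantLoopA (variants : List String) (available_types : List String) : Option String :=
  match variants with
  | [] => none
  | v :: rest => if v ∈ available_types then some v else pvVariantLoopA rest available_types

def resolve_celltype_variant (cell_type : String) (available_types : List String) : Option String :=
  if cell_type ∈ available_types then some cell_type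
  else if CELLTYPE_VARIANTS.contains cell_type then
    match CELLTYPE_VARIANTS.get? cell_type with
    | some vs => pvVariantLoopA vs available_types
    | none => none
  else none

-- inner helper resolve_single_path; `if resolved_ct:` is Python truthiness = the string is nonempty
def resolve_single_path (path : List String) (available_types : List String) : List String :=
  path.foldl (fun resolved ct =>
    match resolve_celltype_variant ct available_types with
    | some s => if s ≠ "" then resolved ++ [s] else resolved ++ [ct]
    | none => resolved ++ [ct]) []

def resolve_differentiation_paths (paths : List String) (available_types : List String) : List String :=
  if paths = [] then paths
  else resolve_single_path paths available_types

-- ===== PORT B =====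
-- the inner `for v in variants: if v in available_types: subs[name] = v; break` loop
def pvFirstVariantB (vs : List String) (available_types : List String) : Option String :=
  match vs with
  | [] => none
  | v :: rest => if v ∈ available_types then some v else pvFirstVariantB rest available_types

-- the `for name, variants in CELLTYPE_VARIANTS.items():` loop building subs
def pvSubsB (available_types : List String) : PySem.Dict String String :=
  CELLTYPE_VARIANTS.items.foldl (fun subs kv =>
    if kv.1 ∈ available_types then subs
    else
      match pvFirstVariantB kv.2 available_types with
      | some v => subs.insert kv.1 v
      | none => subs) PySem.Dict.empty

def resolve_differentiation_paths_alt (paths : List String) (available_types : List String) : List String :=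
  if paths = [] then paths
  else
    let subs := pvSubsB available_types
    paths.map (fun ct => subs.getD ct ct)

-- ===== PRECONDITION & SPEC =====
def Spec_resolve_differentiation_paths (paths : List String) (available_types : List String) (out : List String) : Prop := out = resolve_differentiation_paths_alt paths available_types
instance (paths : List String) (available_types : List String) (out : List String) : Decidable (Spec_resolve_differentiation_paths paths available_types out) := by unfold Spec_resolve_differentiation_paths; infer_instance

-- ===== CLAIM (what is proved, stated in full; the proofs are below) =====
def Claim_equal_resolve_differentiation_paths : Prop := ∀ (paths : List String) (available_types : List String), Dom_resolve_differentiation_paths paths available_types → Spec_resolve_differentiation_paths paths available_types (resolve_differentiation_paths paths available_types)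

-- ===== LEMMAS AND PROOFS =====

-- A's per-element result, as a function
def pvElemA (available_types : List String) (ct : String) : String :=
  match resolve_celltype_variant ct available_types with
  | some s => if s ≠ "" then s else ct
  | none => ct

lemma subsB_getD (ct : String) (av : List String) :
    (pvSubsB av).getD ct ct = pvElemA av ct := by
  have hit : CELLTYPE_VARIANTS.items
      = [("nlPC/ExN", ["nIPC/ExN"]), ("nIPC/ExN", ["nlPC/ExN"])] := by decide
  unfold pvSubsB pvElemA resolve_celltype_variant
  rw [hit]
  by_cases h1 : ct = "nlPC/ExN"
  · subst h1
    by_cases ha : "nlPC/ExN" ∈ av <;> by_cases hb : "nIPC/ExN" ∈ av <;>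
      simp_all [List.foldl, pvVariantLoopA, pvFirstVariantB, CELLTYPE_VARIANTS,
        PySem.Dict.get?, PySem.Dict.contains, PySem.Dict.getD,
        PySem.Dict.insert, PySem.Dict.empty, List.find?]
  · by_cases h2 : ct = "nIPC/ExN"
    · subst h2
      by_cases ha : "nlPC/ExN" ∈ av <;> by_cases hb : "nIPC/ExN" ∈ av <;>
        simp_all [List.foldl, pvVariantLoopA, pvFirstVariantB, CELLTYPE_VARIANTS,
          PySem.Dict.get?, PySem.Dict.contains, PySem.Dict.getD,
          PySem.Dict.insert, PySem.Dict.empty, List.find?]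
    · -- ct is neither variant key: both sides leave ct unchanged (or return ct ∈ av)
      have hg1 : ("nlPC/ExN" == ct) = false := by simp [Ne.symm h1]
      have hg2 : ("nIPC/ExN" == ct) = false := by simp [Ne.symm h2]
      by_cases ha : "nlPC/ExN" ∈ av <;> by_cases hb : "nIPC/ExN" ∈ av <;>
        by_cases hav : ct ∈ av <;>
          simp [List.foldl, ha, hb, hav, hg1, hg2, hit,
            pvFirstVariantB, List.any, List.find?,
            PySem.Dict.get?, PySem.Dict.contains, PySem.Dict.getD,
            PySem.Dict.insert, PySem.Dict.empty]

lemma single_path_eq_map (path : List String) (available_types : List String) :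
    resolve_single_path path available_types = path.map (pvElemA available_types) := by
  unfold resolve_single_path
  have hbody : (fun (resolved : List String) (ct : String) =>
      match resolve_celltype_variant ct available_types with
      | some s => if s ≠ "" then resolved ++ [s] else resolved ++ [ct]
      | none => resolved ++ [ct])
      = fun resolved ct => resolved ++ [pvElemA available_types ct] := by
    funext resolved ct
    unfold pvElemA
    cases resolve_celltype_variant ct available_types with
    | none => rfl
    | some s => by_cases hs : s = "" <;> simp [hs]
  rw [hbody, PySem.List.foldl_append_singleton_eq_map]
  simp

-- ===== VERDICT (by name: the statement is the Claim_ definition above) =====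
theorem resolve_differentiation_paths_spec : Claim_equal_resolve_differentiation_paths := by
  intro paths available_types _
  unfold Spec_resolve_differentiation_paths resolve_differentiation_paths resolve_differentiation_paths_alt
  by_cases hp : paths = []
  · simp [hp]
  · simp only [hp, if_false]
    rw [single_path_eq_map]
    exact List.map_congr_left fun ct _ => (subsB_getD ct available_types).symm
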